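-- pv_equiv track=rewrite | github.com/miyoungshin/SNU_BDI | 경영_빅데이터_프로그래밍/정리 전/경영빅데이터/경영빅데이터_20170802/감성분석.py | weight_boost
-- ===== SOURCE A (Python) =====
-- def weight_boost(list_pairs, dic_boost): # 부스트 단어를 확인하고 그 가중치 만큼을 추가하는 함수
-- 	'''If any booster exists, appply the booster to the corresponding word
--
-- 	list_pairs.: a list of (word, weight) processed by weight_default()
-- 	dic_boost..: a dictionary processed by parse_weight() using
-- 				 BoosterWordList.txt
-- 	Return.....: a list of boosted (word,weight) pairs
-- 	'''
--
-- 	l = []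
-- 	boost = 0
-- 	for p in list_pairs:
-- 		w = p[1]
-- 		if boost != 0 :
-- 			if w > 0 :
-- 				w += boost
-- 			elif w < 0:
-- 				w -= boost
-- 			l.append((p[0],w))
-- 		else:
-- 			l.append(p)
-- 		if p[0] in dic_boost:
-- 			boost = dic_boost[p[0]]
-- 	return l
-- ===== SOURCE B (Python) =====
-- def weight_boost(list_pairs, dic_boost):
--     # Pass 1: compute the boost value active just BEFORE each pair
--     # (a boost word's value applies only to later pairs, until replaced).
--     boosts = []
--     b = 0
--     for word, _ in list_pairs:
--         boosts.append(b)
--         b = dic_boost.get(word, b)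
--     # Pass 2: apply each pair's active boost.
--     return [(word, w + (b if w > 0 else -b if w < 0 else 0))
--             for (word, w), b in zip(list_pairs, boosts)]
-- ===== Notes on version B (the rewrite author's own statement) =====
-- stated objective: alternative
-- what changed: A interleaves state update and application in one loop with a mutating accumulator; B first computes, in a separate pass, the boost active before each pair, then applies it positionally via zip in a comprehension (signed add folded into one arithmetic expression).
import Mathlib
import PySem

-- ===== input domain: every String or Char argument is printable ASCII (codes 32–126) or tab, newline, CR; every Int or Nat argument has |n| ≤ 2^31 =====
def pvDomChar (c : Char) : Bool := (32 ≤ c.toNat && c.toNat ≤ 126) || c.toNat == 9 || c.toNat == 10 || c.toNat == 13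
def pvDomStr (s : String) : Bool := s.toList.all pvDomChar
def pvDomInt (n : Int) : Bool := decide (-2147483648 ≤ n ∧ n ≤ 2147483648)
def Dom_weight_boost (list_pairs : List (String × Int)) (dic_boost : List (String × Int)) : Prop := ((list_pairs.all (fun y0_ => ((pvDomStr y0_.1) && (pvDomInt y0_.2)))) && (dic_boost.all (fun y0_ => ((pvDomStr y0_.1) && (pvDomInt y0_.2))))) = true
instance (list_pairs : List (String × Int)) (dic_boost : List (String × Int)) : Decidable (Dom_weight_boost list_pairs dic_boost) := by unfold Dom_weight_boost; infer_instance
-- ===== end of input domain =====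

-- B recomputes the same result by a different decomposition: a first pass collects the boost active
-- before each pair, a second pass applies it via zip (alternative structure, same cost).


-- ===== PORT A =====
-- Literal port of A: one foldl carrying (l, boost); 'p[0] in dic_boost' + 'dic_boost[p[0]]'
-- is the match on (Dict.ofList dic_boost).get?.
def weight_boost (list_pairs : List (String × Int)) (dic_boost : List (String × Int)) : List (String × Int) :=
  let d := PySem.Dict.ofList dic_boost
  (list_pairs.foldl (fun (st : List (String × Int) × Int) p =>
      let w := p.2
      let l := if st.2 ≠ 0 then
          st.1 ++ [(p.1, if w > 0 then w + st.2 else if w < 0 then w - st.2 else w)]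
        else st.1 ++ [p]
      let boost := match d.get? p.1 with
        | some v => v
        | none => st.2
      (l, boost))
    ([], 0)).1

-- ===== PORT B =====
-- Port of B: pass 1 builds the list of pre-pair boosts; pass 2 zips and applies.
def weight_boost_alt (list_pairs : List (String × Int)) (dic_boost : List (String × Int)) : List (String × Int) :=
  let d := PySem.Dict.ofList dic_boost
  let boosts := (list_pairs.foldl (fun (st : List Int × Int) p =>
      (st.1 ++ [st.2], (d.get? p.1).getD st.2)) ([], 0)).1
  (list_pairs.zip boosts).map (fun pb =>
    (pb.1.1, pb.1.2 + (if pb.1.2 > 0 then pb.2 else if pb.1.2 < 0 then -pb.2 else 0)))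

-- ===== PRECONDITION & SPEC =====
def Spec_weight_boost (list_pairs : List (String × Int)) (dic_boost : List (String × Int)) (out : List (String × Int)) : Prop := out = weight_boost_alt list_pairs dic_boost
instance (list_pairs : List (String × Int)) (dic_boost : List (String × Int)) (out : List (String × Int)) : Decidable (Spec_weight_boost list_pairs dic_boost out) := by unfold Spec_weight_boost; infer_instance

-- ===== CLAIM (what is proved, stated in full; the proofs are below) =====
def Claim_equal_weight_boost : Prop := ∀ (list_pairs : List (String × Int)) (dic_boost : List (String × Int)), Dom_weight_boost list_pairs dic_boost → Spec_weight_boost list_pairs dic_boost (weight_boost list_pairs dic_boost)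

-- ===== LEMMAS AND PROOFS =====

-- ===== VERDICT (by name: the statement is the Claim_ definition above) =====
-- direct-recursion description of the result, parametric in the lookup dict and start boost
def wbGo (d : PySem.Dict String Int) : List (String × Int) → Int → List (String × Int)
  | [], _ => []
  | p :: lp, b =>
    (p.1, p.2 + (if p.2 > 0 then b else if p.2 < 0 then -b else 0)) ::
      wbGo d lp ((d.get? p.1).getD b)

-- pre-pair boost list, direct recursion
def wbPre (d : PySem.Dict String Int) : List (String × Int) → Int → List Int
  | [], _ => []
  | p :: lp, b => b :: wbPre d lp ((d.get? p.1).getD b)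

lemma wbA_fold (d : PySem.Dict String Int) (lp : List (String × Int)) :
    ∀ (acc : List (String × Int)) (b : Int),
    (lp.foldl (fun (st : List (String × Int) × Int) p =>
      let w := p.2
      let l := if st.2 ≠ 0 then
          st.1 ++ [(p.1, if w > 0 then w + st.2 else if w < 0 then w - st.2 else w)]
        else st.1 ++ [p]
      let boost := match d.get? p.1 with
        | some v => v
        | none => st.2
      (l, boost)) (acc, b)).1 = acc ++ wbGo d lp b := by
  induction lp with
  | nil => intro acc b; simp [wbGo]
  | cons p lp ih =>
    intro acc b
    simp only [List.foldl_cons, wbGo]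
    rw [ih]
    have hm : (match d.get? p.1 with | some v => v | none => b) = (d.get? p.1).getD b := by
      cases d.get? p.1 <;> rfl
    rw [hm]
    have he : (if b ≠ 0 then
        acc ++ [(p.1, if p.2 > 0 then p.2 + b else if p.2 < 0 then p.2 - b else p.2)]
      else acc ++ [p]) =
        acc ++ [(p.1, p.2 + (if p.2 > 0 then b else if p.2 < 0 then -b else 0))] := by
      by_cases hb : b = 0
      · subst hb; simp
      · simp only [hb, if_true, ne_eq, not_false_iff]
        split_ifs with h1 h2 <;> (simp; try omega)
    simp only [he, List.append_assoc, List.cons_append, List.nil_append]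

lemma wbPre_fold (d : PySem.Dict String Int) (lp : List (String × Int)) :
    ∀ (acc : List Int) (b : Int),
    (lp.foldl (fun (st : List Int × Int) p =>
      (st.1 ++ [st.2], (d.get? p.1).getD st.2)) (acc, b)).1 = acc ++ wbPre d lp b := by
  induction lp with
  | nil => intro acc b; simp [wbPre]
  | cons p lp ih =>
    intro acc b
    simp only [List.foldl_cons, wbPre]
    rw [ih]
    simp

lemma wb_zip (d : PySem.Dict String Int) (lp : List (String × Int)) :
    ∀ (b : Int),
    (lp.zip (wbPre d lp b)).map (fun pb =>
      (pb.1.1, pb.1.2 + (if pb.1.2 > 0 then pb.2 else if pb.1.2 < 0 then -pb.2 else 0)))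
      = wbGo d lp b := by
  induction lp with
  | nil => intro b; simp [wbPre, wbGo]
  | cons p lp ih =>
    intro b
    simp only [wbPre, wbGo, List.zip_cons_cons, List.map_cons, ih]

-- ===== VERDICT (by name: the statement is the Claim_ definition above) =====
theorem weight_boost_spec : Claim_equal_weight_boost := by
  intro lp db _
  unfold Spec_weight_boost weight_boost weight_boost_alt
  simp only [wbA_fold, wbPre_fold, wb_zip, List.nil_append]
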